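-- pv_equiv track=rewrite | github.com/michaelozeri/Sadna2 | Utils.py | split_chromosome_data
-- ===== SOURCE A (Python) =====
-- STRAND_PLUS = "plus"
--
-- STRAND_MINUS = "minus"
--
-- def split_chromosome_data(start_strand, strand_sequence, strand_info):
--     split_object = {STRAND_PLUS: {}, STRAND_MINUS: {}}
--     split_object[STRAND_PLUS]["Sequence"] = []
--     split_object[STRAND_MINUS]["Sequence"] = []
--     current_strand = start_strand
--     for i in range(len(strand_sequence)):
--         if strand_info[i] == -1:
--             continue
--         if strand_info[i] == 0 or strand_info[i] == 2:
--             current_strand = switch_strand(current_strand)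
--         split_object[current_strand]["Sequence"].append(strand_sequence[i])
--     return split_object
--
-- def switch_strand(current_strand):
--     if current_strand == STRAND_PLUS:
--         return STRAND_MINUS
--     else:
--         return STRAND_PLUS
-- ===== SOURCE B (Python) =====
-- STRAND_PLUS = "plus"
--
-- STRAND_MINUS = "minus"
--
--
-- def switch_strand(current_strand):
--     if current_strand == STRAND_PLUS:
--         return STRAND_MINUS
--     else:
--         return STRAND_PLUS
--
--
-- def split_chromosome_data(start_strand, strand_sequence, strand_info):
--     flipped = switch_strand(start_strand)
--     # pass 1: the strand label in effect at each position
--     labels = []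
--     on_flipped = False
--     for i in range(len(strand_sequence)):
--         if strand_info[i] == 0 or strand_info[i] == 2:
--             on_flipped = not on_flipped
--         labels.append(flipped if on_flipped else start_strand)
--     # pass 2: partition the sequence entries into two plain lists
--     plus_seq = []
--     minus_seq = []
--     for i, label in enumerate(labels):
--         if strand_info[i] == -1:
--             continue
--         (plus_seq if label == STRAND_PLUS else minus_seq).append(strand_sequence[i])
--     return {STRAND_PLUS: {"Sequence": plus_seq},
--             STRAND_MINUS: {"Sequence": minus_seq}}
-- ===== Notes on version B (the rewrite author's own statement) =====
-- stated objective: alternative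
-- what changed: Replaces A's single running-flag loop that mutates a nested dict as it goes with two flat passes: first precompute the strand label in effect at each position (a boolean parity over the 0/2 flags selecting between start_strand and its switch), then partition the sequence entries into two plain lists by comparing each label to 'plus', building the nested dict only once at the end.
import Mathlib
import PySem

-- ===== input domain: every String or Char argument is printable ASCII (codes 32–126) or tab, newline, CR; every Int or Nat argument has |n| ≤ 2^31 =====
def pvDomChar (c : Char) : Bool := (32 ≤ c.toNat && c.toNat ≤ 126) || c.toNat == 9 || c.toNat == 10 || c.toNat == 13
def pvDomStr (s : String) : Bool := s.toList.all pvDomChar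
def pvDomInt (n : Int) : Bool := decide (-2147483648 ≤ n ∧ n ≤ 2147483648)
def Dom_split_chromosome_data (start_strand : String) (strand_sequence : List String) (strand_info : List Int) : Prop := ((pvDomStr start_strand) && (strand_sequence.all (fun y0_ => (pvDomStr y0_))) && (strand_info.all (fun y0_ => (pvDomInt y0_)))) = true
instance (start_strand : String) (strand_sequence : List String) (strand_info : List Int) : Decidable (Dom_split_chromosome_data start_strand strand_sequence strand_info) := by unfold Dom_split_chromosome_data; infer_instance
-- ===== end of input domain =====

-- B replaces A's single running-flag loop over a mutated nested dict by two flat passes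
-- (precompute the strand label at each position, then partition into two plain lists);
-- same O(n) cost, different decomposition.

-- ===== PORT A =====
-- module helper used by both versions
def switch_strand (current_strand : String) : String :=
  if current_strand = "plus" then "minus" else "plus"

-- Port of A. Loop indices i satisfy 0 ≤ i < len(strand_sequence), so List.getD is exact for
-- strand_sequence; for strand_info it is exact whenever len(strand_sequence) ≤ len(strand_info)
-- (otherwise Python raises IndexError — excluded by Pre_). Dict.getD stands in for Python's
-- raising dict lookup: the KeyError case (current strand not a key) is excluded by Pre_.
def split_chromosome_data (start_strand : String) (strand_sequence : List String) (strand_info : List Int) : List (String × List (String × List String)) :=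
  -- split_object = {plus: {}, minus: {}}; split_object[s]["Sequence"] = [] mutates the inner
  -- dict in place = re-insert at the same key (overwrite keeps position)
  let so : PySem.Dict String (PySem.Dict String (List String)) :=
    PySem.Dict.ofList [("plus", PySem.Dict.ofList []), ("minus", PySem.Dict.ofList [])]
  let so := so.insert "plus" ((so.getD "plus" (PySem.Dict.ofList [])).insert "Sequence" [])
  let so := so.insert "minus" ((so.getD "minus" (PySem.Dict.ofList [])).insert "Sequence" [])
  let r := (List.range strand_sequence.length).foldl
    (fun (st : PySem.Dict String (PySem.Dict String (List String)) × String) i =>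
      if strand_info.getD i 0 = -1 then st
      else
        let cur := if strand_info.getD i 0 = 0 ∨ strand_info.getD i 0 = 2 then switch_strand st.2 else st.2
        let inner := st.1.getD cur (PySem.Dict.ofList [])
        (st.1.insert cur (inner.insert "Sequence" (inner.getD "Sequence" [] ++ [strand_sequence.getD i ""])), cur))
    (so, start_strand)
  r.1.items.map (fun p => (p.1, p.2.items))

-- ===== PORT B =====
-- Port of B (Source B). Pass 1 builds the label list with a boolean parity flag; pass 2 folds over
-- enumerate(labels) (here List.zipIdx, exact: indices 0..n-1) and partitions into two lists.
-- Same List.getD reading of the two Python indexings as in A's port (exact under Pre_).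
def split_chromosome_data_alt (start_strand : String) (strand_sequence : List String) (strand_info : List Int) : List (String × List (String × List String)) :=
  let flipped := switch_strand start_strand
  -- pass 1: the strand label in effect at each position
  let labels := ((List.range strand_sequence.length).foldl
    (fun (st : Bool × List String) i =>
      let p := if strand_info.getD i 0 = 0 ∨ strand_info.getD i 0 = 2 then !st.1 else st.1
      (p, st.2 ++ [if p then flipped else start_strand]))
    (false, [])).2
  -- pass 2: partition the sequence entries into two plain lists
  let r := labels.zipIdx.foldl
    (fun (st : List String × List String) (pr : String × Nat) =>
      if strand_info.getD pr.2 0 = -1 then st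
      else if pr.1 = "plus" then (st.1 ++ [strand_sequence.getD pr.2 ""], st.2)
      else (st.1, st.2 ++ [strand_sequence.getD pr.2 ""]))
    ([], [])
  [("plus", [("Sequence", r.1)]), ("minus", [("Sequence", r.2)])]

-- ===== PRECONDITION & SPEC =====
-- Pre_ excludes exactly the inputs on which A raises: IndexError when strand_info is shorter than
-- strand_sequence, and KeyError when start_strand is neither "plus" nor "minus" and some element is
-- appended before the first switch (i.e. some non-(-1) entry is not preceded, inclusively, by a 0/2 entry).
def Pre_split_chromosome_data (start_strand : String) (strand_sequence : List String) (strand_info : List Int) : Prop :=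
  strand_sequence.length ≤ strand_info.length ∧
  (start_strand = "plus" ∨ start_strand = "minus" ∨
    ∀ i < strand_sequence.length, strand_info.getD i 0 ≠ -1 →
      ∃ j ≤ i, strand_info.getD j 0 = 0 ∨ strand_info.getD j 0 = 2)
instance (start_strand : String) (strand_sequence : List String) (strand_info : List Int) : Decidable (Pre_split_chromosome_data start_strand strand_sequence strand_info) := by unfold Pre_split_chromosome_data; infer_instance

def pvWitness_split_chromosome_data : String × List String × List Int := ("plus", ["a", "b", "c"], [1, 0, -1])

def Spec_split_chromosome_data (start_strand : String) (strand_sequence : List String) (strand_info : List Int) (out : List (String × List (String × List String))) : Prop := out = split_chromosome_data_alt start_strand strand_sequence strand_info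
instance (start_strand : String) (strand_sequence : List String) (strand_info : List Int) (out : List (String × List (String × List String))) : Decidable (Spec_split_chromosome_data start_strand strand_sequence strand_info out) := by unfold Spec_split_chromosome_data; infer_instance

-- ===== CLAIM (what is proved, stated in full; the proofs are below) =====
def Claim_equal_split_chromosome_data : Prop := ∀ (start_strand : String) (strand_sequence : List String) (strand_info : List Int), Dom_split_chromosome_data start_strand strand_sequence strand_info → Pre_split_chromosome_data start_strand strand_sequence strand_info → Spec_split_chromosome_data start_strand strand_sequence strand_info (split_chromosome_data start_strand strand_sequence strand_info)

-- ===== LEMMAS AND PROOFS =====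

-- number of switches performed while processing the first m indices
def cntT (info : List Int) (m : Nat) : Nat :=
  (List.range m).countP (fun i => decide (info.getD i 0 = 0 ∨ info.getD i 0 = 2))

-- the strand A's running flag holds after k switches starting from s
def strandAt (s : String) (k : Nat) : String :=
  if k = 0 then s
  else if k % 2 = 1 then switch_strand s
  else switch_strand (switch_strand s)

-- the label B computes at position i (parity of the switch count up to and including i)
def labelAt (s : String) (info : List Int) (i : Nat) : String :=
  if cntT info (i + 1) % 2 = 1 then switch_strand s else s

theorem switch_mem (s : String) : switch_strand s = "plus" ∨ switch_strand s = "minus" := by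
  unfold switch_strand; split_ifs <;> simp

theorem sw3 (s : String) : switch_strand (switch_strand (switch_strand s)) = switch_strand s := by
  unfold switch_strand; split_ifs <;> simp_all

theorem sw2_plus (s : String) : switch_strand (switch_strand s) = "plus" ↔ s = "plus" := by
  unfold switch_strand; split_ifs with h <;> simp_all

theorem strandAt_succ (s : String) (k : Nat) :
    strandAt s (k + 1) = switch_strand (strandAt s k) := by
  unfold strandAt
  rcases Nat.eq_zero_or_pos k with hk | hk
  · subst hk; norm_num
  · have hk0 : ¬ k = 0 := by omega
    have hk1 : ¬ k + 1 = 0 := by omega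
    rcases Nat.mod_two_eq_zero_or_one k with h | h
    · have h' : (k + 1) % 2 = 1 := by omega
      simp [hk0, h, h', sw3]
    · have h' : ¬ (k + 1) % 2 = 1 := by omega
      simp [hk0, h, h']

theorem strandAt_mem (s : String) (k : Nat)
    (h : s = "plus" ∨ s = "minus" ∨ 1 ≤ k) :
    strandAt s k = "plus" ∨ strandAt s k = "minus" := by
  unfold strandAt
  rcases Nat.eq_zero_or_pos k with hk | hk
  · subst hk
    rw [if_pos rfl]
    rcases h with h | h | h
    · exact Or.inl h
    · exact Or.inr h
    · omega
  · have hk0 : ¬ k = 0 := by omega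
    rw [if_neg hk0]
    split_ifs
    · exact switch_mem s
    · exact switch_mem _

-- A's running flag is "plus" exactly when B's parity label is "plus"
theorem strandAt_plus_iff (s : String) (k : Nat) :
    strandAt s k = "plus" ↔ (if k % 2 = 1 then switch_strand s else s) = "plus" := by
  unfold strandAt
  rcases Nat.eq_zero_or_pos k with hk | hk
  · subst hk; norm_num
  · have hk0 : ¬ k = 0 := by omega
    rw [if_neg hk0]
    rcases Nat.mod_two_eq_zero_or_one k with h | h
    · simp [h, sw2_plus]
    · simp [h]

theorem cntT_succ (info : List Int) (m : Nat) :
    cntT info (m + 1) =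
      cntT info m + (if info.getD m 0 = 0 ∨ info.getD m 0 = 2 then 1 else 0) := by
  unfold cntT
  rw [List.range_succ, List.countP_append]
  simp only [List.countP_cons, List.countP_nil, List.getD, decide_eq_true_eq]
  split_ifs <;> simp

-- the two bucket lists both versions compute
def pBuck (start : String) (seq : List String) (info : List Int) (m : Nat) : List String :=
  ((List.range m).filter
    (fun i => decide (info.getD i 0 ≠ -1) && decide (strandAt start (cntT info (i + 1)) = "plus"))).map
    (fun i => seq.getD i "")

def mBuck (start : String) (seq : List String) (info : List Int) (m : Nat) : List String :=
  ((List.range m).filter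
    (fun i => decide (info.getD i 0 ≠ -1) && decide (strandAt start (cntT info (i + 1)) = "minus"))).map
    (fun i => seq.getD i "")

theorem pBuck_succ_skip (start : String) (seq : List String) (info : List Int) (m : Nat)
    (h : info.getD m 0 = -1) :
    pBuck start seq info (m + 1) = pBuck start seq info m := by
  unfold pBuck; rw [List.range_succ, List.filter_append]
  simp only [List.getD] at h; simp [h]

theorem mBuck_succ_skip (start : String) (seq : List String) (info : List Int) (m : Nat)
    (h : info.getD m 0 = -1) :
    mBuck start seq info (m + 1) = mBuck start seq info m := by
  unfold mBuck; rw [List.range_succ, List.filter_append]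
  simp only [List.getD] at h; simp [h]

theorem pBuck_succ_plus (start : String) (seq : List String) (info : List Int) (m : Nat)
    (h : ¬ info.getD m 0 = -1) (hs : strandAt start (cntT info (m + 1)) = "plus") :
    pBuck start seq info (m + 1) = pBuck start seq info m ++ [seq.getD m ""] := by
  unfold pBuck; rw [List.range_succ, List.filter_append]
  simp only [List.getD] at h; simp [h, hs]

theorem mBuck_succ_plus (start : String) (seq : List String) (info : List Int) (m : Nat)
    (hs : strandAt start (cntT info (m + 1)) = "plus") :
    mBuck start seq info (m + 1) = mBuck start seq info m := by
  unfold mBuck; rw [List.range_succ, List.filter_append]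
  have : strandAt start (cntT info (m + 1)) ≠ "minus" := by rw [hs]; decide
  simp [this]

theorem mBuck_succ_minus (start : String) (seq : List String) (info : List Int) (m : Nat)
    (h : ¬ info.getD m 0 = -1) (hs : strandAt start (cntT info (m + 1)) = "minus") :
    mBuck start seq info (m + 1) = mBuck start seq info m ++ [seq.getD m ""] := by
  unfold mBuck; rw [List.range_succ, List.filter_append]
  simp only [List.getD] at h; simp [h, hs]

theorem pBuck_succ_minus (start : String) (seq : List String) (info : List Int) (m : Nat)
    (hs : strandAt start (cntT info (m + 1)) = "minus") :
    pBuck start seq info (m + 1) = pBuck start seq info m := by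
  unfold pBuck; rw [List.range_succ, List.filter_append]
  have : strandAt start (cntT info (m + 1)) ≠ "plus" := by rw [hs]; decide
  simp [this]

-- invariant of A's loop
theorem A_loop (start : String) (seq : List String) (info : List Int) (m : Nat)
    (hgood : ∀ i < m, info.getD i 0 ≠ -1 →
      strandAt start (cntT info (i + 1)) = "plus" ∨ strandAt start (cntT info (i + 1)) = "minus") :
    (List.range m).foldl
      (fun (st : PySem.Dict String (PySem.Dict String (List String)) × String) i =>
        if info.getD i 0 = -1 then st
        else
          let cur := if info.getD i 0 = 0 ∨ info.getD i 0 = 2 then switch_strand st.2 else st.2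
          let inner := st.1.getD cur (PySem.Dict.ofList [])
          (st.1.insert cur (inner.insert "Sequence" (inner.getD "Sequence" [] ++ [seq.getD i ""])), cur))
      (PySem.Dict.mk [("plus", PySem.Dict.mk [("Sequence", [])]),
                      ("minus", PySem.Dict.mk [("Sequence", [])])], start)
      = (PySem.Dict.mk [("plus", PySem.Dict.mk [("Sequence", pBuck start seq info m)]),
                        ("minus", PySem.Dict.mk [("Sequence", mBuck start seq info m)])],
         strandAt start (cntT info m)) := by
  induction m with
  | zero => simp [pBuck, mBuck, cntT, strandAt]
  | succ m ih =>
    rw [List.range_succ, List.foldl_append,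
      ih (fun i hi => hgood i (Nat.lt_succ_of_lt hi))]
    simp only [List.foldl_cons, List.foldl_nil]
    by_cases h : info.getD m 0 = -1
    · have hc : cntT info (m + 1) = cntT info m := by
        rw [cntT_succ, if_neg (by rw [h]; norm_num)]; ring
      have h' : info[m]?.getD 0 = -1 := h
      simp [h', pBuck_succ_skip _ _ _ _ h, mBuck_succ_skip _ _ _ _ h, hc]
    · have hcur : (if info.getD m 0 = 0 ∨ info.getD m 0 = 2
            then switch_strand (strandAt start (cntT info m))
            else strandAt start (cntT info m)) = strandAt start (cntT info (m + 1)) := by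
        by_cases ht : info.getD m 0 = 0 ∨ info.getD m 0 = 2
        · rw [if_pos ht, cntT_succ, if_pos ht, ← strandAt_succ]
        · rw [if_neg ht, cntT_succ, if_neg ht]; simp
      have h' : ¬ info[m]?.getD 0 = -1 := h
      have hcur' : (if info[m]?.getD 0 = 0 ∨ info[m]?.getD 0 = 2
            then switch_strand (strandAt start (cntT info m))
            else strandAt start (cntT info m)) = strandAt start (cntT info (m + 1)) := hcur
      rcases hgood m (Nat.lt_succ_self m) h with hs | hs
      · simp [h', hcur', hs, List.find?, PySem.Dict.getD, PySem.Dict.get?, PySem.Dict.insert,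
          PySem.Dict.contains, pBuck_succ_plus _ _ _ _ h hs, mBuck_succ_plus _ _ _ _ hs]
      · simp [h', hcur', hs, List.find?, PySem.Dict.getD, PySem.Dict.get?, PySem.Dict.insert,
          PySem.Dict.contains, pBuck_succ_minus _ _ _ _ hs, mBuck_succ_minus _ _ _ _ h hs]

-- invariant of B's first pass: the parity flag and the label list, characterised
theorem labels_fold (start : String) (info : List Int) (m : Nat) :
    (List.range m).foldl
      (fun (st : Bool × List String) i =>
        let p := if info.getD i 0 = 0 ∨ info.getD i 0 = 2 then !st.1 else st.1
        (p, st.2 ++ [if p then switch_strand start else start]))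
      (false, [])
    = (decide (cntT info m % 2 = 1), (List.range m).map (labelAt start info)) := by
  induction m with
  | zero => simp [cntT]
  | succ m ih =>
    rw [List.range_succ, List.foldl_append, ih]
    simp only [List.foldl_cons, List.foldl_nil, List.map_append, List.map_cons, List.map_nil]
    have hp : (if info.getD m 0 = 0 ∨ info.getD m 0 = 2
          then !(decide (cntT info m % 2 = 1)) else decide (cntT info m % 2 = 1))
        = decide (cntT info (m + 1) % 2 = 1) := by
      rw [cntT_succ]
      by_cases ht : info.getD m 0 = 0 ∨ info.getD m 0 = 2
      · rw [if_pos ht, if_pos ht]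
        rcases Nat.mod_two_eq_zero_or_one (cntT info m) with h | h
        · have h' : (cntT info m + 1) % 2 = 1 := by omega
          simp [h, h']
        · have h' : (cntT info m + 1) % 2 = 0 := by omega
          simp [h, h']
      · rw [if_neg ht, if_neg ht]; simp
    have hl : (if (decide (cntT info (m + 1) % 2 = 1)) = true
          then switch_strand start else start) = labelAt start info m := by
      unfold labelAt
      by_cases h : cntT info (m + 1) % 2 = 1 <;> simp [h]
    simp only [hp, hl]

-- invariant of B's second pass: partitioning the label list gives exactly A's two buckets
theorem part_fold (start : String) (seq : List String) (info : List Int) (m : Nat)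
    (hgood : ∀ i < m, info.getD i 0 ≠ -1 →
      strandAt start (cntT info (i + 1)) = "plus" ∨ strandAt start (cntT info (i + 1)) = "minus") :
    ((List.range m).map (labelAt start info)).zipIdx.foldl
      (fun (st : List String × List String) (pr : String × Nat) =>
        if info.getD pr.2 0 = -1 then st
        else if pr.1 = "plus" then (st.1 ++ [seq.getD pr.2 ""], st.2)
        else (st.1, st.2 ++ [seq.getD pr.2 ""]))
      ([], [])
    = (pBuck start seq info m, mBuck start seq info m) := by
  induction m with
  | zero => simp [pBuck, mBuck]
  | succ m ih =>
    rw [List.range_succ, List.map_append, List.zipIdx_append, List.foldl_append,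
      ih (fun i hi => hgood i (Nat.lt_succ_of_lt hi))]
    simp only [List.map_cons, List.map_nil, List.length_map, List.length_range,
      List.zipIdx_cons, List.zipIdx_nil, List.foldl_cons, List.foldl_nil, Nat.zero_add]
    by_cases h : info.getD m 0 = -1
    · have h' : info[m]?.getD 0 = -1 := h
      simp [h', pBuck_succ_skip _ _ _ _ h, mBuck_succ_skip _ _ _ _ h]
    · have h' : ¬ info[m]?.getD 0 = -1 := h
      rcases hgood m (Nat.lt_succ_self m) h with hs | hs
      · have hl : labelAt start info m = "plus" := by
          have := (strandAt_plus_iff start (cntT info (m + 1))).mp hs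
          unfold labelAt; exact this
        simp [h', hl, pBuck_succ_plus _ _ _ _ h hs, mBuck_succ_plus _ _ _ _ hs]
      · have hl : ¬ labelAt start info m = "plus" := by
          intro hc
          have := (strandAt_plus_iff start (cntT info (m + 1))).mpr hc
          rw [hs] at this
          exact absurd this (by decide)
        simp [h', hl, pBuck_succ_minus _ _ _ _ hs, mBuck_succ_minus _ _ _ _ h hs]

-- ===== VERDICT (by name: the statement is the Claim_ definition above) =====
theorem split_chromosome_data_spec : Claim_equal_split_chromosome_data := by
  intro start seq info _hdom hpre
  unfold Spec_split_chromosome_data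
  obtain ⟨-, hstart⟩ := hpre
  have hgood : ∀ i < seq.length, info.getD i 0 ≠ -1 →
      strandAt start (cntT info (i + 1)) = "plus" ∨ strandAt start (cntT info (i + 1)) = "minus" := by
    intro i hi hni
    rcases hstart with h | h | h
    · exact strandAt_mem _ _ (Or.inl h)
    · exact strandAt_mem _ _ (Or.inr (Or.inl h))
    · obtain ⟨j, hj, hjt⟩ := h i hi hni
      refine strandAt_mem _ _ (Or.inr (Or.inr ?_))
      have hpos : 0 < cntT info (i + 1) := by
        unfold cntT
        rw [List.countP_pos_iff]
        exact ⟨j, List.mem_range.mpr (by omega), by simpa using hjt⟩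
      omega
  have hA : split_chromosome_data start seq info =
      [("plus", [("Sequence", pBuck start seq info seq.length)]),
       ("minus", [("Sequence", mBuck start seq info seq.length)])] := by
    show List.map (fun p => (p.1, p.2.items))
        ((List.foldl
          (fun (st : PySem.Dict String (PySem.Dict String (List String)) × String) i =>
            if info.getD i 0 = -1 then st
            else
              let cur := if info.getD i 0 = 0 ∨ info.getD i 0 = 2 then switch_strand st.2 else st.2
              let inner := st.1.getD cur (PySem.Dict.ofList [])
              (st.1.insert cur (inner.insert "Sequence" (inner.getD "Sequence" [] ++ [seq.getD i ""])), cur))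
          (PySem.Dict.mk [("plus", PySem.Dict.mk [("Sequence", [])]),
                          ("minus", PySem.Dict.mk [("Sequence", [])])], start)
          (List.range seq.length)).1.items) = _
    rw [A_loop start seq info seq.length hgood]
    simp
  have hB : split_chromosome_data_alt start seq info =
      [("plus", [("Sequence", pBuck start seq info seq.length)]),
       ("minus", [("Sequence", mBuck start seq info seq.length)])] := by
    show [("plus", [("Sequence",
        (List.foldl
          (fun (st : List String × List String) (pr : String × Nat) =>
            if info.getD pr.2 0 = -1 then st
            else if pr.1 = "plus" then (st.1 ++ [seq.getD pr.2 ""], st.2)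
            else (st.1, st.2 ++ [seq.getD pr.2 ""]))
          ([], [])
          ((List.foldl
            (fun (st : Bool × List String) i =>
              let p := if info.getD i 0 = 0 ∨ info.getD i 0 = 2 then !st.1 else st.1
              (p, st.2 ++ [if p then switch_strand start else start]))
            (false, []) (List.range seq.length)).2.zipIdx)).1)]),
       ("minus", [("Sequence",
        (List.foldl
          (fun (st : List String × List String) (pr : String × Nat) =>
            if info.getD pr.2 0 = -1 then st
            else if pr.1 = "plus" then (st.1 ++ [seq.getD pr.2 ""], st.2)
            else (st.1, st.2 ++ [seq.getD pr.2 ""]))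
          ([], [])
          ((List.foldl
            (fun (st : Bool × List String) i =>
              let p := if info.getD i 0 = 0 ∨ info.getD i 0 = 2 then !st.1 else st.1
              (p, st.2 ++ [if p then switch_strand start else start]))
            (false, []) (List.range seq.length)).2.zipIdx)).2)])] = _
    rw [labels_fold, part_fold start seq info seq.length hgood]
  rw [hA, hB]
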